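-- pv_equiv track=rewrite | github.com/rblis/leetcode | problems/oldmission.py | solution
-- ===== SOURCE A (Python) =====
-- import math
--
-- def solution(N):
--     # write your code in Python 3.6
--     def at(num, n):
--         return num //10**n % 10
--     if N < 10:
--         return N + 1
--     for i in range(N+1, 1000000000):
--         check = True
--         for j in range(1, int(math.log10(i))+1):
--             if at(i,j) == at(i,j-1):
--                 check = False
--                 break
--         if check:
--             return i
-- ===== SOURCE B (Python) =====
-- def solution(N):
--     # Skip-scan: jump straight past every block of numbers sharing an adjacent
--     # equal digit pair instead of testing candidates one by one.
--     if N < 10: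
--         return N + 1
--     x = N + 1
--     while True:
--         t, p = 0, 1
--         while p * 10 <= x:
--             if x // p % 10 == x // (p * 10) % 10:
--                 t = p
--                 break
--             p *= 10
--         if t == 0:
--             return x
--         x = (x // t + 1) * t
-- ===== Notes on version B (the rewrite author's own statement) =====
-- stated objective: faster
-- what changed: Replaces A's one-by-one scan of every integer above N with a digit-repair loop: find the lowest adjacent equal digit pair at power-of-ten position t and jump x to (x//t+1)*t, skipping the whole invalid block at once.
-- outside the precondition, e.g. on solution(1000000000): A returns None, B returns 1010101010
import Mathlib
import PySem

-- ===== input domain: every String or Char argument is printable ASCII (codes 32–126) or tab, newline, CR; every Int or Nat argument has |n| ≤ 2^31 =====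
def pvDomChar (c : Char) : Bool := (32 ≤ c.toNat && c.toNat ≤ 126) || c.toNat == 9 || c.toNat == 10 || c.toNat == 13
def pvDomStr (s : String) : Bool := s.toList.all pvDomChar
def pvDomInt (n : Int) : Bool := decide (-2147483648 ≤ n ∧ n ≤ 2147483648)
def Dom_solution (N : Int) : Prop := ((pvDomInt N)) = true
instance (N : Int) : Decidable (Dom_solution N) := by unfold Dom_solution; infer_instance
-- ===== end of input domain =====

-- B replaces A's unit-step scan with a digit-repair skip loop (measured faster); equivalence is on return values inside Pre_.

-- ===== PORT A =====
-- helper `at(num, n) = num // 10**n % 10`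
def pvAt (num : Int) (n : Nat) : Int :=
  PySem.Int.mod (PySem.Int.floordiv num ((10 : Int) ^ n)) 10

-- `int(math.log10(i))`: exact as the digit-count logarithm for every integer i ≥ 1
-- in A's loop range (verified: the float computation is exact there).
def pvLog10 (i : Int) : Nat := Nat.log 10 i.toNat

-- inner loop `for j in range(1, L+1): if at(i,j)==at(i,j-1): check=False; break`
def pvCheckAux (i : Int) (L : Nat) : Nat → Nat → Bool
  | 0, _ => true
  | fuel + 1, j =>
    if j ≤ L then
      if pvAt i j = pvAt i (j - 1) then false
      else pvCheckAux i L fuel (j + 1)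
    else true

def pvCheck (i : Int) : Bool := pvCheckAux i (pvLog10 i) (pvLog10 i + 1) 1

-- outer loop `for i in range(N+1, 1000000000)`; falls off the end (Python: None) → 0, excluded by Pre_
def pvALoop : Nat → Int → Int
  | 0, _ => 0
  | fuel + 1, i =>
    if i < 1000000000 then
      (if pvCheck i then i else pvALoop fuel (i + 1))
    else 0

def solution (N : Int) : Int :=
  if N < 10 then N + 1 else pvALoop 1000000000 (N + 1)

-- ===== PORT B =====
-- inner while of Source B: scan p = 1, 10, 100, … while p*10 ≤ x for the lowest adjacent
-- equal digit pair; returns the position t (0 = none).  The fuel is a totality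
-- guard only (the scan stops once p*10 > x, within ≤ 11 steps on every reachable x).
def pvFindViol (x : Int) : Nat → Int → Int
  | 0, _ => 0
  | fuel + 1, p =>
    if p * 10 ≤ x then
      if PySem.Int.mod (PySem.Int.floordiv x p) 10
          = PySem.Int.mod (PySem.Int.floordiv x (p * 10)) 10 then p
      else pvFindViol x fuel (p * 10)
    else 0

-- outer `while True` of Source B; the fuel is a totality guard only (the loop exits long before).
def pvBLoop (fuel : Nat) (x : Int) : Int :=
  match fuel with
  | 0 => x
  | f + 1 =>
    let t := pvFindViol x 12 1
    if t = 0 then x else pvBLoop f ((PySem.Int.floordiv x t + 1) * t)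

def solution_alt (N : Int) : Int :=
  if N < 10 then N + 1 else pvBLoop 1000000000 (N + 1)

-- ===== PRECONDITION & SPEC =====
-- Pre_ excludes N ≥ 989898989 (the largest N with a valid answer below A's hard 10^9 cap):
-- there A's search exhausts range(N+1, 10**9) and returns None, which is no Int.
def Pre_solution (N : Int) : Prop := N < 989898989
instance (N : Int) : Decidable (Pre_solution N) := by unfold Pre_solution; infer_instance
def pvWitness_solution : Int := (4321)

def Spec_solution (N : Int) (out : Int) : Prop := out = solution_alt N
instance (N : Int) (out : Int) : Decidable (Spec_solution N out) := by unfold Spec_solution; infer_instance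

-- ===== CLAIM (what is proved, stated in full; the proofs are below) =====
def Claim_equal_solution : Prop := ∀ (N : Int), Dom_solution N → Pre_solution N → Spec_solution N (solution N)

-- ===== LEMMAS AND PROOFS =====

-- digit k of x (for x ≥ 0), the value both ports compare
def pvDigit (x : Int) (k : Nat) : Int :=
  PySem.Int.mod (PySem.Int.floordiv x ((10 : Int) ^ k)) 10

-- "no adjacent equal digit pair at positions ≥ k0"
def NoVF (x : Int) (k0 : Nat) : Prop :=
  ∀ k : Nat, k0 ≤ k → (10 : Int) ^ (k + 1) ≤ x → pvDigit x k ≠ pvDigit x (k + 1)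

theorem pow10_pos (k : Nat) : (0:Int) < 10 ^ k := by positivity

theorem pow10_mono {k j : Nat} (h : k ≤ j) : (10:Int) ^ k ≤ 10 ^ j :=
  pow_le_pow_right₀ (by norm_num) h

theorem fv_aux : ∀ (n : Nat) (x : Int) (k : Nat), x < 10 ^ (k + n) →
    (pvFindViol x n ((10:Int) ^ k) = 0 ∧ NoVF x k) ∨
    (∃ j, k ≤ j ∧ pvFindViol x n ((10:Int) ^ k) = (10:Int) ^ j ∧ (10:Int) ^ (j + 1) ≤ x ∧
      pvDigit x j = pvDigit x (j + 1)) := by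
  intro n
  induction n with
  | zero =>
    intro x k hn
    left
    refine ⟨rfl, ?_⟩
    intro j hkj hjx
    exfalso
    have h1 : (10:Int) ^ k ≤ 10 ^ j := pow10_mono hkj
    have h2 : (10:Int) ^ (j + 1) = 10 ^ j * 10 := pow_succ 10 j
    have h3 := pow10_pos j
    simp only [Nat.add_zero] at hn
    linarith
  | succ n ih =>
    intro x k hn
    by_cases hguard : (10:Int) ^ k * 10 ≤ x
    · rw [show pvFindViol x (n + 1) ((10:Int) ^ k)
          = (if (10:Int) ^ k * 10 ≤ x then
              if PySem.Int.mod (PySem.Int.floordiv x ((10:Int) ^ k)) 10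
                  = PySem.Int.mod (PySem.Int.floordiv x ((10:Int) ^ k * 10)) 10 then (10:Int) ^ k
              else pvFindViol x n ((10:Int) ^ k * 10)
            else 0) from rfl, if_pos hguard]
      by_cases heq : PySem.Int.mod (PySem.Int.floordiv x ((10:Int) ^ k)) 10
          = PySem.Int.mod (PySem.Int.floordiv x ((10:Int) ^ k * 10)) 10
      · rw [if_pos heq]
        right
        exact ⟨k, le_refl k, rfl, by rw [pow_succ]; exact hguard,
          by unfold pvDigit; rw [pow_succ]; exact heq⟩
      · rw [if_neg heq]
        have hrec : (10:Int) ^ k * 10 = 10 ^ (k + 1) := (pow_succ 10 k).symm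
        rw [hrec]
        have hm : x < 10 ^ (k + 1 + n) := by
          have he : k + 1 + n = k + (n + 1) := by omega
          rw [he]; exact hn
        rcases ih x (k + 1) hm with ⟨h0, hnv⟩ | ⟨j, hj, hfv, hjx, hdg⟩
        · left
          refine ⟨h0, ?_⟩
          intro j hkj hjx
          by_cases hjk : j = k
          · subst hjk; unfold pvDigit; rw [pow_succ]; exact heq
          · exact hnv j (by omega) hjx
        · right; exact ⟨j, by omega, hfv, hjx, hdg⟩
    · rw [show pvFindViol x (n + 1) ((10:Int) ^ k)
          = (if (10:Int) ^ k * 10 ≤ x then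
              if PySem.Int.mod (PySem.Int.floordiv x ((10:Int) ^ k)) 10
                  = PySem.Int.mod (PySem.Int.floordiv x ((10:Int) ^ k * 10)) 10 then (10:Int) ^ k
              else pvFindViol x n ((10:Int) ^ k * 10)
            else 0) from rfl, if_neg hguard]
      push_neg at hguard
      left
      refine ⟨rfl, ?_⟩
      intro j hkj hjx
      exfalso
      have h1 : (10:Int) ^ (k + 1) ≤ 10 ^ (j + 1) := pow10_mono (by omega)
      have h2 : (10:Int) ^ (k + 1) = 10 ^ k * 10 := pow_succ 10 k
      linarith

theorem fv_spec (x : Int) (hx : x ≤ 989898989) :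
    (pvFindViol x 12 1 = 0 ∧ NoVF x 0) ∨
    (∃ j, pvFindViol x 12 1 = (10:Int) ^ j ∧ (10:Int) ^ (j + 1) ≤ x ∧
      pvDigit x j = pvDigit x (j + 1)) := by
  have h00 : ((10:Int) ^ (0:Nat)) = 1 := pow_zero 10
  have hn : x < 10 ^ (0 + 12) := by norm_num; linarith
  rcases fv_aux 12 x 0 hn with ⟨h0, hnv⟩ | ⟨j, -, hfv, hjx, hdg⟩
  · left; rw [h00] at h0; exact ⟨h0, hnv⟩
  · right; rw [h00] at hfv; exact ⟨j, hfv, hjx, hdg⟩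

theorem checkAux_iff (i : Int) (L : Nat) :
    ∀ (n j : Nat), L + 1 - j ≤ n →
      (pvCheckAux i L n j = true ↔ ∀ m, j ≤ m → m ≤ L → pvAt i m ≠ pvAt i (m - 1)) := by
  intro n
  induction n with
  | zero =>
    intro j hn
    constructor
    · intro _ m hjm hmL; exfalso; omega
    · intro _; rfl
  | succ n ihn =>
    intro j hn
    show (if j ≤ L then
        if pvAt i j = pvAt i (j - 1) then false else pvCheckAux i L n (j + 1)
      else true) = true ↔ _
    by_cases hj : j ≤ L
    · rw [if_pos hj]
      by_cases he : pvAt i j = pvAt i (j - 1)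
      · rw [if_pos he]
        simp only [Bool.false_eq_true, false_iff, not_forall]
        exact ⟨j, le_rfl, hj, by simpa using he⟩
      · rw [if_neg he, ihn (j + 1) (by omega)]
        constructor
        · intro H m hjm hmL
          rcases eq_or_lt_of_le hjm with rfl | hlt
          · exact he
          · exact H m (by omega) hmL
        · intro H m hm1 hmL
          exact H m (by omega) hmL
    · rw [if_neg hj]
      constructor
      · intro _ m hjm hmL; exfalso; omega
      · intro _; rfl

theorem check_iff (i : Int) (hi : 1 ≤ i) : pvCheck i = true ↔ NoVF i 0 := by
  have h0 : (0:Int) ≤ i := by omega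
  have hkey : ∀ m : Nat, ((10:Int) ^ m ≤ i ↔ m ≤ pvLog10 i) := by
    intro m
    unfold pvLog10
    rw [← Nat.pow_le_iff_le_log (by norm_num) (by omega : i.toNat ≠ 0)]
    rw [← Nat.cast_le (α := Int)]
    push_cast
    rw [Int.toNat_of_nonneg h0]
  unfold pvCheck
  rw [checkAux_iff i (pvLog10 i) (pvLog10 i + 1) 1 (by omega)]
  constructor
  · intro H k _ hk
    have hm := H (k + 1) (by omega) ((hkey (k + 1)).mp hk)
    intro h
    apply hm
    have e2 : pvAt i (k + 1 - 1) = pvDigit i k := by norm_num [pvAt, pvDigit]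
    rw [e2]
    exact h.symm
  · intro H m h1m hmL
    obtain ⟨k, rfl⟩ : ∃ k, m = k + 1 := ⟨m - 1, by omega⟩
    have hnk := H k (Nat.zero_le k) ((hkey (k + 1)).mpr hmL)
    intro h
    apply hnk
    have e2 : pvAt i (k + 1 - 1) = pvDigit i k := by norm_num [pvAt, pvDigit]
    rw [e2] at h
    exact h.symm

theorem novf_C : NoVF 989898989 0 := by
  intro k _ hk
  have hk8 : k ≤ 8 := by
    by_contra h
    have h10 : (10:Int) ^ 10 ≤ 10 ^ (k + 1) := pow10_mono (by omega)
    have he : (10:Int) ^ 10 = 10000000000 := by norm_num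
    linarith
  interval_cases k <;> decide

theorem bloop_spec : ∀ (fuel : Nat) (x : Int), 1 ≤ x → x ≤ 989898989 →
    ((989898990:Int) - x).toNat ≤ fuel →
    x ≤ pvBLoop fuel x ∧ pvBLoop fuel x ≤ 989898989 ∧ NoVF (pvBLoop fuel x) 0 ∧
      (∀ m, x ≤ m → m < pvBLoop fuel x → ¬ NoVF m 0) := by
  intro fuel
  induction fuel with
  | zero =>
    intro x h1 hC hf
    exfalso; omega
  | succ f ih =>
    intro x h1 hC hf
    rcases fv_spec x hC with ⟨hz, hnv⟩ | ⟨j, hfv, hjx, hdg⟩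
    · have hstep : pvBLoop (f + 1) x = x := by simp [pvBLoop, hz]
      rw [hstep]
      exact ⟨le_refl x, hC, hnv, fun m hm1 hm2 => absurd (lt_of_le_of_lt hm1 hm2) (lt_irrefl x)⟩
    · have hpj := pow10_pos j
      have hred : pvBLoop (f + 1) x
          = pvBLoop f ((PySem.Int.floordiv x ((10:Int) ^ j) + 1) * 10 ^ j) := by
        simp only [pvBLoop, hfv]
        rw [if_neg hpj.ne']
      set q := PySem.Int.floordiv x ((10:Int) ^ j) with hq
      have hqb : q * 10 ^ j ≤ x ∧ x < (q + 1) * 10 ^ j :=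
        (PySem.Int.floordiv_eq_iff_of_pos hpj).mp hq.symm
      set x' := (q + 1) * 10 ^ j with hx'
      have hxx' : x < x' := hqb.2
      have hskip : ∀ m, x ≤ m → m < x' → ¬ NoVF m 0 := by
        intro m hxm hmx' hNm
        have hqm : PySem.Int.floordiv m ((10:Int) ^ j) = q := by
          rw [PySem.Int.floordiv_eq_iff_of_pos hpj]
          exact ⟨le_trans hqb.1 hxm, hmx'⟩
        have hjm : (10:Int) ^ (j + 1) ≤ m := le_trans hjx hxm
        have hdm : pvDigit m j = pvDigit x j := by
          unfold pvDigit; rw [hqm, ← hq]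
        have hdd : ∀ y : Int, PySem.Int.floordiv y ((10:Int) ^ (j + 1))
            = PySem.Int.floordiv (PySem.Int.floordiv y ((10:Int) ^ j)) 10 := by
          intro y
          rw [PySem.Int.floordiv_eq_ediv_of_pos (pow10_pos (j + 1)),
            PySem.Int.floordiv_eq_ediv_of_pos hpj,
            PySem.Int.floordiv_eq_ediv_of_pos (by norm_num : (0:Int) < 10), pow_succ]
          exact (Int.ediv_ediv_of_nonneg (le_of_lt hpj)).symm
        have hdm1 : pvDigit m (j + 1) = pvDigit x (j + 1) := by
          unfold pvDigit
          rw [hdd m, hdd x, hqm, ← hq]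
        exact (hNm j (Nat.zero_le j) hjm) (by rw [hdm, hdm1]; exact hdg)
      have hx'C : x' ≤ 989898989 := by
        by_contra hgt
        push_neg at hgt
        exact hskip 989898989 hC hgt novf_C
      have hrec := ih x' (by linarith) hx'C (by omega)
      rw [hred]
      obtain ⟨ha, hb, hc, hd⟩ := hrec
      refine ⟨by linarith, hb, hc, ?_⟩
      intro m hm1 hm2
      by_cases hcase : m < x'
      · exact hskip m hm1 hcase
      · exact hd m (by omega) hm2

theorem aloop_eq (r : Int) (hr : r < 1000000000) (hv : NoVF r 0) :
    ∀ (n : Nat) (a : Int), 1 ≤ a → a ≤ r → (r - a).toNat < n →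
      (∀ m, a ≤ m → m < r → ¬ NoVF m 0) → pvALoop n a = r := by
  intro n
  induction n with
  | zero =>
    intro a h1 har hn hinv
    exfalso; omega
  | succ n ihn =>
    intro a h1 har hn hinv
    show (if a < 1000000000 then (if pvCheck a then a else pvALoop n (a + 1)) else 0) = r
    rw [if_pos (by linarith : a < 1000000000)]
    by_cases heq : a = r
    · subst heq
      rw [if_pos ((check_iff a h1).mpr hv)]
    · have har' : a < r := lt_of_le_of_ne har heq
      have hcf : pvCheck a = false := by
        cases hb : pvCheck a
        · rfl
        · exact absurd ((check_iff a h1).mp hb) (hinv a (le_refl a) har')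
      rw [hcf]
      simp only [Bool.false_eq_true, if_false]
      exact ihn (a + 1) (by omega) (by omega) (by omega)
        (fun m hm1 hm2 => hinv m (by omega) hm2)

-- ===== VERDICT (by name: the statement is the Claim_ definition above) =====
theorem solution_spec : Claim_equal_solution := by
  intro N _hD hP
  unfold Spec_solution solution solution_alt
  by_cases h10 : N < 10
  · simp [h10]
  · simp only [h10, if_false]
    have hx1 : (1:Int) ≤ N + 1 := by omega
    have hxC : N + 1 ≤ 989898989 := by unfold Pre_solution at hP; omega
    have hfuel : ((989898990:Int) - (N + 1)).toNat ≤ 1000000000 := by omega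
    obtain ⟨hle, hleC, hv, hnone⟩ := bloop_spec 1000000000 (N + 1) hx1 hxC hfuel
    exact aloop_eq _ (by omega) hv 1000000000 _ hx1 hle (by omega) hnone
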